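-- pv_equiv track=rewrite | github.com/yanghaocsg/wxindex | YhHadoop/YhChineseNorm.py | num_to_chinese
-- ===== SOURCE A (Python) =====
-- def num_to_chinese(strnum):
--     num={'1':u'一','2':u'二','3':u'三','4':u'四','5':u'五','6':u'六','7':u'七','8':u'八','9':u'九','0':u'零'}
--     res = ''
--     trans = 0
--     for s in strnum:
--         if(s in num):
--             res += num[s]
--             trans = 1
--         else:
--             res += s
--     return res if trans else strnum
-- ===== SOURCE B (Python) =====
-- def num_to_chinese(strnum):
--     # ten staged whole-string substitution passes, one per digit
--     for d, ch in zip('1234567890', u'\u4e00\u4e8c\u4e09\u56db\u4e94\u516d\u4e03\u516b\u4e5d\u96f6'):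
--         strnum = strnum.replace(d, ch)
--     return strnum
-- ===== Notes on version B (the rewrite author's own statement) =====
-- stated objective: alternative
-- what changed: Replaces A's single per-character accumulate-and-branch loop (with its dead trans flag) by ten staged whole-string str.replace substitution passes, one per digit.
import Mathlib
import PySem

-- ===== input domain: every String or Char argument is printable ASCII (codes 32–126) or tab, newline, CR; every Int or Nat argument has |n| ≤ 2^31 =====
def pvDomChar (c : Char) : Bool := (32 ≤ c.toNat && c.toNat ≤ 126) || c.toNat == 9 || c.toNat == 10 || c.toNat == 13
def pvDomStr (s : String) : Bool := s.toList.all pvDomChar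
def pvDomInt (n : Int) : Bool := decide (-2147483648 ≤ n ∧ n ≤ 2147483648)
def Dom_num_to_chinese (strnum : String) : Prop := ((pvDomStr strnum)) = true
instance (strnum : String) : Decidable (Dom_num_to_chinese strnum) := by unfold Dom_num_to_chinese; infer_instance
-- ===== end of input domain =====

-- B replaces A's per-character accumulate-and-branch loop (with its dead trans flag) by
-- ten staged whole-string str.replace substitution passes, one per digit; objective: alternative.

-- ===== PORT A =====
-- num = {'1':'一', '2':'二', …, '0':'零'}
def numDict : PySem.Dict Char String :=
  PySem.Dict.ofList [('1', "一"), ('2', "二"), ('3', "三"), ('4', "四"), ('5', "五"),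
                     ('6', "六"), ('7', "七"), ('8', "八"), ('9', "九"), ('0', "零")]

def num_to_chinese (strnum : String) : String :=
  -- res = ''; trans = 0; for s in strnum: if s in num: res += num[s]; trans = 1 else: res += s
  let st := strnum.toList.foldl
    (fun (acc : String × Int) s =>
      if (numDict.get? s).isSome then
        (acc.1 ++ numDict.getD s "", 1)
      else
        (acc.1.push s, acc.2))
    ("", 0)
  -- return res if trans else strnum
  if st.2 ≠ 0 then st.1 else strnum

-- ===== PORT B =====
-- zip('1234567890', '一二三四五六七八九零')
def pvPairs : List (Char × Char) :=
  [('1', '一'), ('2', '二'), ('3', '三'), ('4', '四'), ('5', '五'),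
   ('6', '六'), ('7', '七'), ('8', '八'), ('9', '九'), ('0', '零')]

-- for d, ch in zip(...): strnum = strnum.replace(d, ch); return strnum
def num_to_chinese_alt (strnum : String) : String :=
  pvPairs.foldl
    (fun s p => PySem.Str.replace s (String.ofList [p.1]) (String.ofList [p.2]))
    strnum

-- ===== PRECONDITION & SPEC =====
def Spec_num_to_chinese (strnum : String) (out : String) : Prop := out = num_to_chinese_alt strnum
instance (strnum : String) (out : String) : Decidable (Spec_num_to_chinese strnum out) := by unfold Spec_num_to_chinese; infer_instance

-- ===== CLAIM =====
def Claim_equal_num_to_chinese : Prop := ∀ (strnum : String), Dom_num_to_chinese strnum → Spec_num_to_chinese strnum (num_to_chinese strnum)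

-- ===== LEMMAS AND PROOFS =====

-- the combined per-character substitution both programs realise
def pvTr (c : Char) : Char :=
  if c = '1' then '一' else if c = '2' then '二' else if c = '3' then '三' else
  if c = '4' then '四' else if c = '5' then '五' else if c = '6' then '六' else
  if c = '7' then '七' else if c = '8' then '八' else if c = '9' then '九' else
  if c = '0' then '零' else c

-- A's dict lookup, characterised through pvTr: digits hit, everything else misses
theorem numDict_get (c : Char) :
    numDict.get? c = if pvTr c = c then none else some (String.ofList [pvTr c]) := by
  have hmk : numDict = PySem.Dict.mk [('1', "一"), ('2', "二"), ('3', "三"), ('4', "四"),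
      ('5', "五"), ('6', "六"), ('7', "七"), ('8', "八"), ('9', "九"), ('0', "零")] := by rfl
  by_cases h1 : c = '1'; · subst h1; decide
  by_cases h2 : c = '2'; · subst h2; decide
  by_cases h3 : c = '3'; · subst h3; decide
  by_cases h4 : c = '4'; · subst h4; decide
  by_cases h5 : c = '5'; · subst h5; decide
  by_cases h6 : c = '6'; · subst h6; decide
  by_cases h7 : c = '7'; · subst h7; decide
  by_cases h8 : c = '8'; · subst h8; decide
  by_cases h9 : c = '9'; · subst h9; decide
  by_cases h0 : c = '0'; · subst h0; decide
  rw [hmk]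
  simp [beq_iff_eq, PySem.Dict.get?, pvTr,
        Ne.symm h1, Ne.symm h2, Ne.symm h3, Ne.symm h4, Ne.symm h5,
        Ne.symm h6, Ne.symm h7, Ne.symm h8, Ne.symm h9, Ne.symm h0,
        h1, h2, h3, h4, h5, h6, h7, h8, h9, h0]

theorem push_append_ofList (r : String) (c : Char) (l : List Char) :
    r.push c ++ String.ofList l = r ++ String.ofList (c :: l) := by
  apply String.ext; simp

theorem append_ofList_cons (r : String) (c : Char) (l : List Char) :
    r ++ String.ofList [c] ++ String.ofList l = r ++ String.ofList (c :: l) := by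
  apply String.ext; simp

-- loop invariant for A: the accumulator is the translated prefix, and a still-zero flag
-- means the translation left the prefix unchanged
theorem loop_inv (l : List Char) (res : String) (t : Int) :
    (l.foldl
      (fun (acc : String × Int) s =>
        if (numDict.get? s).isSome then (acc.1 ++ numDict.getD s "", 1)
        else (acc.1.push s, acc.2)) (res, t)).1 = res ++ String.ofList (l.map pvTr) ∧
    ((l.foldl
      (fun (acc : String × Int) s =>
        if (numDict.get? s).isSome then (acc.1 ++ numDict.getD s "", 1)
        else (acc.1.push s, acc.2)) (res, t)).2 = t ∧ l.map pvTr = l ∨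
     (l.foldl
      (fun (acc : String × Int) s =>
        if (numDict.get? s).isSome then (acc.1 ++ numDict.getD s "", 1)
        else (acc.1.push s, acc.2)) (res, t)).2 = 1) := by
  induction l generalizing res t with
  | nil =>
    refine ⟨?_, Or.inl ⟨rfl, rfl⟩⟩
    simp only [List.foldl_nil, List.map_nil]
    exact (by apply String.ext; simp)
  | cons c cs ih =>
    have hg := numDict_get c
    by_cases hcc : pvTr c = c
    · rw [if_pos hcc] at hg
      simp only [List.foldl_cons, hg, Option.isSome_none, Bool.false_eq_true,
        ite_false, List.map_cons, hcc]
      obtain ⟨h1, h2⟩ := ih (res.push c) t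
      refine ⟨by rw [h1, push_append_ofList], ?_⟩
      rcases h2 with ⟨ht, hm⟩ | ht
      · exact Or.inl ⟨ht, by rw [hm]⟩
      · exact Or.inr ht
    · rw [if_neg hcc] at hg
      have hD : numDict.getD c "" = String.ofList [pvTr c] := by
        rw [PySem.Dict.getD_eq_get?_getD, hg]; rfl
      simp only [List.foldl_cons, hg, Option.isSome_some, if_pos, List.map_cons]
      obtain ⟨h1, h2⟩ := ih (res ++ numDict.getD c "") 1
      refine ⟨?_, ?_⟩
      · rw [h1, hD, append_ofList_cons]
      · rcases h2 with ⟨ht, _⟩ | ht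
        · exact Or.inr ht
        · exact Or.inr ht

-- B side: single-character substitution
def pvSub (d ch : Char) (c : Char) : Char := if c = d then ch else c

-- replace.go with a one-character pattern is the pointwise substitution
theorem replace_go_single (d ch : Char) (l acc : List Char) (fuel : Nat)
    (h : l.length ≤ fuel) :
    PySem.Chars.replace.go [d] [ch] fuel l acc = acc.reverse ++ l.map (pvSub d ch) := by
  induction l generalizing fuel acc with
  | nil =>
    cases fuel <;> simp [PySem.Chars.replace.go]
  | cons c t ih =>
    cases fuel with
    | zero => simp at h
    | succ n =>
      have ht : t.length ≤ n := by simpa using h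
      by_cases hc : c = d
      · subst hc
        have hpre : List.isPrefixOf [c] (c :: t) = true := by
          simp [List.isPrefixOf]
        have hd : List.drop ([c] : List Char).length (c :: t) = t := by simp
        simp only [PySem.Chars.replace.go, hpre, if_pos, hd]
        rw [ih _ _ ht]
        simp [pvSub]
      · have hpre : List.isPrefixOf [d] (c :: t) = false := by
          simp [List.isPrefixOf]; exact fun hdc => absurd hdc.symm hc
        simp only [PySem.Chars.replace.go, hpre, Bool.false_eq_true, if_neg, not_false_iff]
        rw [ih _ _ ht]
        simp [pvSub, hc]

theorem replace_single (d ch : Char) (l : List Char) :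
    PySem.Chars.replace l [d] [ch] = l.map (pvSub d ch) := by
  rw [PySem.Chars.replace]
  simp only [List.isEmpty_cons, Bool.false_eq_true, if_neg, not_false_iff]
  exact replace_go_single d ch l [] l.length le_rfl

-- composing the ten single-digit substitutions gives pvTr, pointwise
theorem subs_compose (c : Char) :
    pvSub '0' '零' (pvSub '9' '九' (pvSub '8' '八' (pvSub '7' '七' (pvSub '6' '六'
      (pvSub '5' '五' (pvSub '4' '四' (pvSub '3' '三' (pvSub '2' '二'
        (pvSub '1' '一' c))))))))) = pvTr c := by
  by_cases h1 : c = '1'; · subst h1; decide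
  by_cases h2 : c = '2'; · subst h2; decide
  by_cases h3 : c = '3'; · subst h3; decide
  by_cases h4 : c = '4'; · subst h4; decide
  by_cases h5 : c = '5'; · subst h5; decide
  by_cases h6 : c = '6'; · subst h6; decide
  by_cases h7 : c = '7'; · subst h7; decide
  by_cases h8 : c = '8'; · subst h8; decide
  by_cases h9 : c = '9'; · subst h9; decide
  by_cases h0 : c = '0'; · subst h0; decide
  simp [pvSub, pvTr, h1, h2, h3, h4, h5, h6, h7, h8, h9, h0]

-- the chain of ten per-digit map passes collapses to one map of pvTr
theorem map_chain (l : List Char) :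
    ((((((((((l.map (pvSub '1' '一')).map (pvSub '2' '二')).map (pvSub '3' '三')).map
      (pvSub '4' '四')).map (pvSub '5' '五')).map (pvSub '6' '六')).map (pvSub '7' '七')).map
      (pvSub '8' '八')).map (pvSub '9' '九')).map (pvSub '0' '零')) = l.map pvTr := by
  induction l with
  | nil => rfl
  | cons c t ih =>
    simp only [List.map_cons]
    rw [ih, subs_compose c]

-- B computes the pointwise translation
theorem alt_eq_map (strnum : String) :
    num_to_chinese_alt strnum = String.ofList (strnum.toList.map pvTr) := by
  unfold num_to_chinese_alt pvPairs
  apply String.ext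
  simp only [List.foldl_cons, List.foldl_nil]
  -- peel the ten Str.replace calls down to Chars.replace on toList
  have hof : ∀ c : Char, (String.ofList [c]).toList = [c] := by intro c; simp
  simp only [PySem.Str.toList_replace, hof, replace_single]
  rw [map_chain]
  simp

-- ===== VERDICT =====
theorem num_to_chinese_spec : Claim_equal_num_to_chinese := by
  intro strnum _
  unfold Spec_num_to_chinese num_to_chinese
  rw [alt_eq_map]
  obtain ⟨h1, h2⟩ := loop_inv strnum.toList "" 0
  rcases h2 with ⟨ht, hm⟩ | ht
  · simp only [ht, ne_eq, not_true_eq_false, if_false]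
    rw [hm]
    exact (by apply String.ext; simp)
  · simp only [ht]
    norm_num
    rw [h1]
    exact (by apply String.ext; simp)
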